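-- pv_equiv track=rewrite | github.com/kaluginpeter/Algorithms_and_structures_tasks | CodeWars/6kyu/N-centered_Array.py | is_centered
-- ===== SOURCE A (Python) =====
-- def is_centered(xs: list[int], n: int) -> bool:
--     if not xs: return False
--     left: int = 0
--     right: int = len(xs) - 1
--     acc: int = sum(xs)
--     while left <= right:
--         if acc == n: return True
--         acc -= xs[left]
--         acc -= xs[right]
--         left += 1
--         right -= 1
--     return acc == n and not (len(xs) & 1)
-- ===== SOURCE B (Python) =====
-- def is_centered(xs: list[int], n: int) -> bool:
--     if not xs:
--         return False
--     return any(sum(xs[k:len(xs) - k]) == n for k in range(len(xs) // 2 + 1))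
-- ===== Notes on version B (the rewrite author's own statement) =====
-- stated objective: simpler
-- what changed: Replaces A's two-pointer loop with a running accumulator by a single any() over k in range(len//2+1) that directly recomputes the sum of each centered slice xs[k:len-k].
import Mathlib
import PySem

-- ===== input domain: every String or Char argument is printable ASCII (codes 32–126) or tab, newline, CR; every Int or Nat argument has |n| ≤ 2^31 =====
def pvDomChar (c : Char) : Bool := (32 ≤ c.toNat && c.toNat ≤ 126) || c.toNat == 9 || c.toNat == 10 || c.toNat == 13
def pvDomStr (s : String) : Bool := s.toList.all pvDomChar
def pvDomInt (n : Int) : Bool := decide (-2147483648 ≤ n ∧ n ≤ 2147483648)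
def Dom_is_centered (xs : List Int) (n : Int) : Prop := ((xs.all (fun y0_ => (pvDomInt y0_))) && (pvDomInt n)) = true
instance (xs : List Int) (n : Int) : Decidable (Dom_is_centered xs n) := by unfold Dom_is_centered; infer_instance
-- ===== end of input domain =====

-- B replaces A's two-pointer running accumulator with a direct `any` over the
-- centered slices xs[k:len-k] for k in range(len//2+1); objective: simpler.

-- ===== PORT A =====
-- the while loop of A: state (left, right, acc); exits with `acc == n and not (len(xs) & 1)`
def isCenteredLoop (xs : List Int) (n : Int) (left right acc : Int) : Bool :=
  if left ≤ right then
    if acc = n then true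
    else isCenteredLoop xs n (left + 1) (right - 1)
      (acc - PySem.List.pyGetD xs left 0 - PySem.List.pyGetD xs right 0)
  else decide (acc = n) && decide (xs.length % 2 = 0)
termination_by (right + 1 - left).toNat
decreasing_by omega

def is_centered (xs : List Int) (n : Int) : Bool :=
  if xs = [] then false
  else isCenteredLoop xs n 0 ((xs.length : Int) - 1) xs.sum

-- ===== PORT B =====
def is_centered_alt (xs : List Int) (n : Int) : Bool :=
  if xs = [] then false
  else (PySem.List.pyRange 0 (PySem.Int.floordiv (xs.length : Int) 2 + 1) 1).any
    (fun k => decide ((PySem.List.slice xs (some k) (some ((xs.length : Int) - k))).sum = n))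

-- ===== PRECONDITION & SPEC =====
def Spec_is_centered (xs : List Int) (n : Int) (out : Bool) : Prop := out = is_centered_alt xs n
instance (xs : List Int) (n : Int) (out : Bool) : Decidable (Spec_is_centered xs n out) := by unfold Spec_is_centered; infer_instance

-- ===== CLAIM (what is proved, stated in full; the proofs are below) =====
def Claim_equal_is_centered : Prop := ∀ (xs : List Int) (n : Int), Dom_is_centered xs n → Spec_is_centered xs n (is_centered xs n)

-- ===== LEMMAS AND PROOFS =====

-- the sum of the centered slice xs[k : len-k]
def midSum (xs : List Int) (k : Nat) : Int := ((xs.drop k).take (xs.length - 2*k)).sum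

lemma slice_mid (xs : List Int) (k : Nat) (hk : k ≤ xs.length) :
    PySem.List.slice xs (some (k : Int)) (some ((xs.length : Int) - k))
      = (xs.drop k).take (xs.length - 2*k) := by
  have hb : ((xs.length : Int) - k) = ((xs.length - k : Nat) : Int) := by omega
  rw [hb, PySem.List.slice_natCast]
  congr 1
  omega

lemma sum_take_peel (l : List Int) (m : Nat) (h2 : 2 ≤ m) (hm : m ≤ l.length) :
    (l.take m).sum = l.getD 0 0 + ((l.drop 1).take (m - 2)).sum + l.getD (m - 1) 0 := by
  obtain ⟨y, t, rfl⟩ : ∃ y t, l = y :: t := by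
    cases l with
    | nil => simp at hm; omega
    | cons y t => exact ⟨y, t, rfl⟩
  obtain ⟨m'', rfl⟩ : ∃ m'', m = m'' + 2 := ⟨m - 2, by omega⟩
  have hlt : m'' < t.length := by simp at hm; omega
  simp only [List.take_succ_cons, List.sum_cons, List.drop_succ_cons, List.drop_zero,
    List.getD_cons_zero, Nat.add_sub_cancel]
  rw [List.sum_take_succ t m'' hlt]
  simp [List.getD, List.getElem?_eq_getElem hlt]
  ring

lemma mid_step (xs : List Int) (k : Nat) (h : 2*k + 2 ≤ xs.length) :
    midSum xs (k+1)
      = midSum xs k - PySem.List.pyGetD xs (k : Int) 0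
          - PySem.List.pyGetD xs ((xs.length : Int) - 1 - k) 0 := by
  have h1 : ((xs.length : Int) - 1 - k) = ((xs.length - 1 - k : Nat) : Int) := by omega
  rw [h1, PySem.List.pyGetD_natCast, PySem.List.pyGetD_natCast]
  unfold midSum
  have hpeel := sum_take_peel (xs.drop k) (xs.length - 2*k) (by omega) (by simp; omega)
  rw [List.drop_drop] at hpeel
  have e1 : (xs.drop k).getD 0 0 = xs.getD k 0 := by
    simp [List.getD, List.getElem?_drop]
  have e2 : (xs.drop k).getD (xs.length - 2*k - 1) 0 = xs.getD (xs.length - 1 - k) 0 := by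
    simp only [List.getD, List.getElem?_drop]
    congr 2
    omega
  have e3 : xs.length - 2*k - 2 = xs.length - 2*(k+1) := by omega
  rw [e1, e2, e3] at hpeel
  linarith [hpeel]

lemma loop_iff (xs : List Int) (n : Int) :
    ∀ (m k : Nat) (acc : Int),
      xs.length + 1 - 2*k ≤ m →
      (2*k ≤ xs.length → acc = midSum xs k) →
      (xs.length % 2 = 0 → 2*k ≤ xs.length) →
      (isCenteredLoop xs n (k : Int) ((xs.length : Int) - 1 - k) acc = true ↔
        ∃ j : Nat, k ≤ j ∧ 2*j ≤ xs.length ∧ midSum xs j = n) := by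
  intro m
  induction m with
  | zero =>
    intro k acc hm hacc hpar
    have hge : xs.length + 1 ≤ 2*k := by omega
    rw [isCenteredLoop, if_neg (by omega)]
    have hodd : xs.length % 2 = 1 := by
      rcases Nat.mod_two_eq_zero_or_one xs.length with h | h
      · exact absurd (hpar h) (by omega)
      · exact h
    simp only [hodd]
    constructor
    · intro h; simp at h
    · rintro ⟨j, hkj, hj, -⟩; omega
  | succ m ih =>
    intro k acc hm hacc hpar
    by_cases hc : (k : Int) ≤ (xs.length : Int) - 1 - k
    · have hkL : 2*k + 1 ≤ xs.length := by omega
      rw [isCenteredLoop, if_pos hc]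
      have hacc' : acc = midSum xs k := hacc (by omega)
      by_cases he : acc = n
      · rw [if_pos he]
        simp only [true_iff]
        exact ⟨k, le_refl k, by omega, by rw [← hacc']; exact he⟩
      · rw [if_neg he]
        have hcast1 : (k : Int) + 1 = ((k + 1 : Nat) : Int) := by omega
        have hcast2 : (xs.length : Int) - 1 - k - 1 = (xs.length : Int) - 1 - (k + 1 : Nat) := by
          push_cast; ring
        rw [hcast1, hcast2]
        rw [ih (k+1) _ (by omega)
          (fun h2 => by
            rw [mid_step xs k (by omega), hacc'])
          (fun hev => by omega)]
        constructor
        · rintro ⟨j, hkj, hj, hsum⟩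
          exact ⟨j, by omega, hj, hsum⟩
        · rintro ⟨j, hkj, hj, hsum⟩
          rcases Nat.lt_or_ge k j with hlt | hge
          · exact ⟨j, by omega, hj, hsum⟩
          · exfalso
            have : j = k := by omega
            subst this
            exact he (by rw [hacc']; exact hsum)
    · have hge : xs.length ≤ 2*k := by omega
      rw [isCenteredLoop, if_neg hc]
      rcases Nat.mod_two_eq_zero_or_one xs.length with hev | hodd
      · have heq : 2*k = xs.length := by have := hpar hev; omega
        have hacc' : acc = midSum xs k := hacc (by omega)
        simp only [hev]
        constructor
        · intro h
          simp at h
          exact ⟨k, le_refl k, by omega, by rw [← hacc']; exact h⟩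
        · rintro ⟨j, hkj, hj, hsum⟩
          have : j = k := by omega
          subst this
          simp [← hacc'] at hsum ⊢
          exact hsum
      · simp only [hodd]
        constructor
        · intro h; simp at h
        · rintro ⟨j, hkj, hj, -⟩; omega

lemma midSum_zero (xs : List Int) : midSum xs 0 = xs.sum := by
  simp [midSum]

-- ===== VERDICT (by name: the statement is the Claim_ definition above) =====
theorem is_centered_spec : Claim_equal_is_centered := by
  intro xs n _
  unfold Spec_is_centered is_centered is_centered_alt
  by_cases hnil : xs = []
  · simp [hnil]
  · rw [if_neg hnil, if_neg hnil]
    have hL : 0 < xs.length := List.length_pos_iff.mpr hnil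
    have hA : isCenteredLoop xs n 0 ((xs.length : Int) - 1) xs.sum = true ↔
        ∃ j : Nat, 0 ≤ j ∧ 2*j ≤ xs.length ∧ midSum xs j = n := by
      have := loop_iff xs n (xs.length + 1) 0 xs.sum (by omega)
        (fun _ => (midSum_zero xs).symm) (fun _ => by omega)
      simpa using this
    have hfd : PySem.Int.floordiv (xs.length : Int) 2 = (xs.length : Int) / 2 :=
      PySem.Int.floordiv_eq_ediv_of_pos (by omega)
    have hB : ((PySem.List.pyRange 0 (PySem.Int.floordiv (xs.length : Int) 2 + 1) 1).any
        (fun k => decide ((PySem.List.slice xs (some k) (some ((xs.length : Int) - k))).sum = n))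
          = true) ↔
        ∃ j : Nat, 0 ≤ j ∧ 2*j ≤ xs.length ∧ midSum xs j = n := by
      rw [List.any_eq_true]
      constructor
      · rintro ⟨x, hxmem, hx⟩
        rw [PySem.List.mem_pyRange_one] at hxmem
        obtain ⟨hx0, hxlt⟩ := hxmem
        rw [hfd] at hxlt
        refine ⟨x.toNat, by omega, by omega, ?_⟩
        have hxeq : ((x.toNat : Nat) : Int) = x := by omega
        have hx' : (PySem.List.slice xs (some x) (some ((xs.length : Int) - x))).sum = n := by
          simpa using hx
        rw [← hxeq, slice_mid xs x.toNat (by omega)] at hx'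
        simpa [midSum] using hx'
      · rintro ⟨j, -, hj, hsum⟩
        refine ⟨(j : Int), ?_, ?_⟩
        · rw [PySem.List.mem_pyRange_one, hfd]
          omega
        · rw [slice_mid xs j (by omega)]
          simpa [midSum] using hsum
    rw [Bool.eq_iff_iff, hA, hB]
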